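-- pv_equiv track=rewrite | github.com/wenqian-ye/FML-HW2 | svm/q5.py | split_fold
-- ===== SOURCE A (Python) =====
-- def split_fold(m, n):
--     quotient = int(m / n)
--     remainder = m % n
--     if remainder > 0:
--         out_list = [quotient] * (n - remainder) + [quotient + 1] * remainder
--     elif remainder < 0:
--         out_list = [quotient - 1] * -remainder + [quotient] * (n + remainder)
--     else:
--         out_list = [quotient] * n
--     for i in range(1, len(out_list)):
--         out_list[i] = out_list[i-1] + out_list[i]
--     return out_list
-- ===== SOURCE B (Python) =====
-- def split_fold(m, n):
--     quotient = int(m / n)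
--     remainder = m % n
--     small = n - remainder
--     return [quotient * k + max(0, k - small) for k in range(1, n + 1)]
-- ===== Notes on version B (the rewrite author's own statement) =====
-- stated objective: simpler
-- what changed: Each cumulative boundary is computed directly by a closed form (quotient*k plus one extra per fold past the small folds) in a single comprehension, instead of materializing a per-fold size list and prefix-summing it in place; Pre_ restricts to the natural domain n > 0: A raises ZeroDivisionError at n = 0, and for n < 0 (a nonsensical fold count) the truncated or empty lists either program yields are unspecified corner values.
-- outside the precondition, e.g. on split_fold(7, -3): A returns [-3, -6], B returns []; on split_fold(-7, -3): A returns [1], B returns []; on split_fold(5, 0): A raises ZeroDivisionError, B raises ZeroDivisionError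
import Mathlib
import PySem

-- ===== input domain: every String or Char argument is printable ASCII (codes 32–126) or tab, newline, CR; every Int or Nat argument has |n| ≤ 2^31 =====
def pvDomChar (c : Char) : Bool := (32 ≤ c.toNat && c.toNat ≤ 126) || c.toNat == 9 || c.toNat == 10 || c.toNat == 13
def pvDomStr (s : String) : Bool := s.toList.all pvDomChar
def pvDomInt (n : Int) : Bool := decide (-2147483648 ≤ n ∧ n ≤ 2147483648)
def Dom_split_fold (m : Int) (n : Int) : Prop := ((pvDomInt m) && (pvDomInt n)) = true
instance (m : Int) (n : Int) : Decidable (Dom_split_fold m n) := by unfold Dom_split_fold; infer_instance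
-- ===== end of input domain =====

-- B computes each cumulative boundary directly by a closed form in one comprehension instead of
-- materializing a per-fold size list and prefix-summing it in place (objective: simpler).

-- ===== PORT A =====
-- int(m / n): Python truncating float division, exact for |m|,|n| ≤ 2^31 (< 2^53) = PySem.Int.truncdiv
def split_fold (m : Int) (n : Int) : List Int :=
  let quotient := PySem.Int.truncdiv m n
  let remainder := PySem.Int.mod m n
  let out_list :=
    if remainder > 0 then
      PySem.List.pyRepeat [quotient] (n - remainder) ++ PySem.List.pyRepeat [quotient + 1] remainder
    else if remainder < 0 then
      PySem.List.pyRepeat [quotient - 1] (-remainder) ++ PySem.List.pyRepeat [quotient] (n + remainder)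
    else
      PySem.List.pyRepeat [quotient] n
  (PySem.List.pyRange 1 (out_list.length : Int) 1).foldl
    (fun acc i =>
      PySem.List.pySetD acc i (PySem.List.pyGetD acc (i - 1) 0 + PySem.List.pyGetD acc i 0))
    out_list

-- ===== PORT B =====
def split_fold_alt (m : Int) (n : Int) : List Int :=
  let quotient := PySem.Int.truncdiv m n
  let remainder := PySem.Int.mod m n
  let small := n - remainder
  (PySem.List.pyRange 1 (n + 1) 1).map (fun k => quotient * k + max 0 (k - small))

-- ===== PRECONDITION & SPEC =====
-- Pre_ restricts to the natural domain of positive fold counts: A raises ZeroDivisionError at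
-- n = 0, and for n < 0 (a nonsensical fold count) the truncated or empty lists either program
-- yields are unspecified corner artefacts of Python's negative-count list repetition.
def Pre_split_fold (m : Int) (n : Int) : Prop := 0 < n
instance (m : Int) (n : Int) : Decidable (Pre_split_fold m n) := by unfold Pre_split_fold; infer_instance
def pvWitness_split_fold : Int × Int := (7, 3)

def Spec_split_fold (m : Int) (n : Int) (out : List Int) : Prop := out = split_fold_alt m n
instance (m : Int) (n : Int) (out : List Int) : Decidable (Spec_split_fold m n out) := by unfold Spec_split_fold; infer_instance

-- ===== CLAIM (what is proved, stated in full; the proofs are below) =====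
def Claim_equal_split_fold : Prop := ∀ (m : Int) (n : Int), Dom_split_fold m n → Pre_split_fold m n → Spec_split_fold m n (split_fold m n)

-- ===== LEMMAS AND PROOFS =====

-- A's loop body, named so the loop characterisation below can speak about it
def pvStep (acc : List Int) (i : Int) : List Int :=
  PySem.List.pySetD acc i (PySem.List.pyGetD acc (i - 1) 0 + PySem.List.pyGetD acc i 0)

-- A's in-place loop over indices 1..j-1 turns the first j entries into prefix sums and keeps the tail
theorem pv_loop (l : List Int) (j : Nat) (hj : j ≤ l.length) :
    (PySem.List.pyRange 1 (j : Int) 1).foldl pvStep l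
      = (List.range j).map (fun i => (l.take (i + 1)).sum) ++ l.drop j := by
  induction j with
  | zero => simp [PySem.List.pyRange_one_eq_nil]
  | succ j ih =>
    rcases Nat.eq_zero_or_pos j with h0 | hpos
    · subst h0
      rw [show ((1:Nat) : Int) = 1 by norm_num, PySem.List.pyRange_one_eq_nil (by norm_num)]
      rcases l with _ | ⟨x, xs⟩
      · simp at hj
      · simp
    · have hj' : j ≤ l.length := by omega
      have hlt : j < l.length := by omega
      rw [show ((j+1 : Nat) : Int) = (j : Int) + 1 by push_cast; ring,
        PySem.List.pyRange_one_succ_right (by exact_mod_cast hpos), List.foldl_append, ih hj']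
      simp only [List.foldl_cons, List.foldl_nil]
      unfold pvStep
      have hlenP : ((List.range j).map (fun i => (l.take (i + 1)).sum)).length = j := by simp
      have hgd1 : PySem.List.pyGetD ((List.range j).map (fun i => (l.take (i + 1)).sum) ++ l.drop j) ((j:Int) - 1) 0 = (l.take j).sum := by
        rw [show ((j:Int) - 1) = ((j - 1 : Nat) : Int) by omega, PySem.List.pyGetD_natCast]
        rw [List.getD_eq_getElem _ _ (by simp; omega)]
        rw [List.getElem_append_left (by simp; omega)]
        simp only [List.getElem_map, List.getElem_range]
        rw [Nat.sub_add_cancel hpos]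
      have hgd2 : PySem.List.pyGetD ((List.range j).map (fun i => (l.take (i + 1)).sum) ++ l.drop j) ((j:Int)) 0 = l[j] := by
        rw [PySem.List.pyGetD_natCast, List.getD_eq_getElem _ _ (by simp; omega)]
        rw [List.getElem_append_right (by omega)]
        simp [hlenP]
      rw [hgd1, hgd2, PySem.List.pySetD_natCast]
      rw [List.drop_eq_getElem_cons hlt]
      rw [List.set_append_right _ _ (by rw [hlenP])]
      simp only [hlenP, Nat.sub_self, List.set_cons_zero]
      rw [List.range_succ, List.map_append]
      simp [List.sum_take_succ _ _ hlt]

-- the prefix sum of a two-block list, in closed form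
theorem pv_sum_take (c1 c2 k : Nat) (a b : Int) (hk : k ≤ c1 + c2) :
    ((List.replicate c1 a ++ List.replicate c2 b).take k).sum
      = ((min k c1 : Nat) : Int) * a + ((k : Int) - ((min k c1 : Nat) : Int)) * b := by
  rw [List.take_append, List.take_replicate, List.take_replicate,
    List.sum_append, List.sum_replicate, List.sum_replicate, List.length_replicate]
  rcases le_total k c1 with h | h
  · have h1 : min k c1 = k := min_eq_left h
    have h2 : k - c1 = 0 := Nat.sub_eq_zero_of_le h
    rw [h1, h2]
    simp
  · have h1 : min k c1 = c1 := min_eq_right h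
    have h2 : min (k - c1) c2 = k - c1 := min_eq_left (by omega)
    rw [h1, h2, nsmul_eq_mul, nsmul_eq_mul, Nat.cast_sub h]

-- one branch: A's loop over the two-block list equals a closed-form map over the boundaries
theorem pv_branch (a b c1 c2 : Int) :
    (PySem.List.pyRange 1 (((List.replicate c1.toNat a ++ List.replicate c2.toNat b).length : Nat) : Int) 1).foldl pvStep
        (List.replicate c1.toNat a ++ List.replicate c2.toNat b)
      = (PySem.List.pyRange 1 (max 0 c1 + max 0 c2 + 1) 1).map
          (fun k => a * min k (max 0 c1) + b * max 0 (k - max 0 c1)) := by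
  rw [pv_loop _ _ le_rfl, List.drop_length, List.append_nil, PySem.List.pyRange_one]
  have hlen : (List.replicate c1.toNat a ++ List.replicate c2.toNat b).length = c1.toNat + c2.toNat := by simp
  have hlen2 : (max 0 c1 + max 0 c2 + 1 - 1).toNat = c1.toNat + c2.toNat := by omega
  rw [hlen, hlen2, List.map_map]
  apply List.map_congr_left
  intro i hi
  have hi' : i < c1.toNat + c2.toNat := List.mem_range.mp hi
  simp only [Function.comp_apply]
  rw [pv_sum_take _ _ _ _ _ (by omega)]
  have e1 : ((min (i + 1) c1.toNat : Nat) : Int) = min (1 + (i : Int)) (max 0 c1) := by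
    push_cast; omega
  rw [e1]
  have e2 : (((i + 1 : Nat) : Int) - min (1 + (i : Int)) (max 0 c1)) = max 0 ((1 + (i : Int)) - max 0 c1) := by
    push_cast; omega
  rw [e2]
  ring

-- the glue: for n > 0 both ports compute the same boundary list
theorem split_fold_eq_alt (m n : Int) (hn : 0 < n) : split_fold m n = split_fold_alt m n := by
  have hr0 : 0 ≤ PySem.Int.mod m n := PySem.Int.mod_nonneg (a := m) hn
  have hrn : PySem.Int.mod m n < n := PySem.Int.mod_lt (a := m) hn
  unfold split_fold split_fold_alt
  simp only [PySem.List.pyRepeat_singleton]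
  rw [show (fun (acc : List Int) (i : Int) =>
      PySem.List.pySetD acc i (PySem.List.pyGetD acc (i - 1) 0 + PySem.List.pyGetD acc i 0)) = pvStep
    from rfl]
  set q := PySem.Int.truncdiv m n with hq
  set r := PySem.Int.mod m n with hrdef
  rcases eq_or_lt_of_le hr0 with hr | hr
  · -- remainder = 0
    rw [if_neg (by omega), if_neg (by omega)]
    rw [show List.replicate n.toNat q
          = List.replicate n.toNat q ++ List.replicate ((0:Int)).toNat q by simp]
    rw [pv_branch q q n 0]
    have hm1 : max (0:Int) n = n := by omega
    have hm0 : max (0:Int) 0 = 0 := by omega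
    rw [hm1, hm0, add_zero]
    apply List.map_congr_left
    intro k hk
    have hk' := (PySem.List.mem_pyRange_one).mp hk
    have h1 : min k n = k := by omega
    have h2 : max (0:Int) (k - n) = 0 := by omega
    have h3 : max (0:Int) (k - (n - r)) = 0 := by omega
    rw [h1, h2, h3]
    ring
  · -- remainder > 0
    rw [if_pos hr]
    rw [pv_branch q (q + 1) (n - r) r]
    have hm1 : max (0:Int) (n - r) = n - r := by omega
    have hm2 : max (0:Int) r = r := by omega
    rw [hm1, hm2, show n - r + r = n by ring]
    apply List.map_congr_left
    intro k hk
    have hk' := (PySem.List.mem_pyRange_one).mp hk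
    have h1 : min k (n - r) = k - max 0 (k - (n - r)) := by omega
    rw [h1]
    ring

-- ===== VERDICT (by name: the statement is the Claim_ definition above) =====
theorem split_fold_spec : Claim_equal_split_fold := by
  intro m n _ hn
  exact split_fold_eq_alt m n hn
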